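-- pv_equiv track=rewrite | github.com/dunz21/yolov7-tracker | utils/PersonImage.py | detect_pattern_change
-- ===== SOURCE A (Python) =====
-- def detect_pattern_change(index_list):
--     # Initialize variables to track the last value and the position of change
--     last_value = None
--     change_position = -1
--     if index_list is None:
--         return None
--
--     for i, index in enumerate(index_list):
--         if last_value is not None and index != last_value:
--             # Detect the change
--             change_type = f"{last_value}{index}"
--             change_position = i - 1
--             break
--         last_value = index
--
--     # If no change was detected
--     if change_position == -1:
--         return None
--
--     # Calculate the positions forward from the change
--     positions_forward = len(index_list) - change_position - 1
--     return change_type, positions_forward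
-- ===== SOURCE B (Python) =====
-- def detect_pattern_change(index_list):
--     if index_list is None:
--         return None
--     # Full run-length encoding of the list (one complete pass, no early exit),
--     # then the answer is read off the first two runs.
--     runs = []
--     for v in index_list:
--         if runs and runs[-1][0] == v:
--             runs[-1][1] += 1
--         else:
--             runs.append([v, 1])
--     if len(runs) < 2:
--         return None
--     return f"{runs[0][0]}{runs[1][0]}", len(index_list) - runs[0][1]
-- ===== Notes on version B (the rewrite author's own statement) =====
-- stated objective: alternative
-- what changed: B builds the full run-length encoding of the list in a single complete pass (no early exit, no last_value state machine) and then answers by inspecting the first two runs: pattern = first two run values concatenated, distance = len(index_list) minus the first run's length.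
import Mathlib
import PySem

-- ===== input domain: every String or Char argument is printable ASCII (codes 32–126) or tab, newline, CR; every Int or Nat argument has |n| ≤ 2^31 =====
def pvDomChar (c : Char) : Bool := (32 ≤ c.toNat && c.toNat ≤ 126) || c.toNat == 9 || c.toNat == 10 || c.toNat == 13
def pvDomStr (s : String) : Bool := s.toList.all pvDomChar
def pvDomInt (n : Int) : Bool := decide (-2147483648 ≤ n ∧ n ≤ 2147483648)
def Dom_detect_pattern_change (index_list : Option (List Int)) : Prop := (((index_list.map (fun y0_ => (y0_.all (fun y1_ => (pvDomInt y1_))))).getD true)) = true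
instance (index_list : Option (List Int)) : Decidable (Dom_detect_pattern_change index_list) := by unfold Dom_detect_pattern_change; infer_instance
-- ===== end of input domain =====

-- B replaces A's break-on-first-change scan by a full run-length encoding pass
-- followed by inspection of the first two runs (objective: alternative).

-- ===== PORT A =====
-- A's for-loop with break: the enumerate counter is carried as `i`; `none` encodes
-- change_position == -1 (no break), `some (change_type, change_position)` a break.
def detectLoopA : List Int → Int → Option Int → Option (String × Int)
  | [], _, _ => none
  | x :: rest, i, last =>
    match last with
    | some lv =>
      if x ≠ lv then some (PySem.Int.toStr lv ++ PySem.Int.toStr x, i - 1)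
      else detectLoopA rest (i + 1) (some x)
    | none => detectLoopA rest (i + 1) (some x)

def detect_pattern_change (index_list : Option (List Int)) : Option (String × Int) :=
  match index_list with
  | none => none
  | some xs =>
    match detectLoopA xs 0 none with
    | none => none
    | some (change_type, change_position) =>
      some (change_type, (xs.length : Int) - change_position - 1)

-- ===== PORT B =====
-- Source B's loop body: `runs` is kept REVERSED (head = Python's runs[-1]), so the
-- in-place `runs[-1][1] += 1` is a head update and `runs.append` a cons.
def stepB (runs : List (Int × Int)) (v : Int) : List (Int × Int) :=
  match runs with
  | (k, c) :: rest => if k == v then (k, c + 1) :: rest else (v, 1) :: (k, c) :: rest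
  | [] => [(v, 1)]

def detect_pattern_change_alt (index_list : Option (List Int)) : Option (String × Int) :=
  match index_list with
  | none => none
  | some xs =>
    let runs := (xs.foldl stepB []).reverse
    match runs with
    | (k0, c0) :: (k1, _) :: _ =>
      some (PySem.Int.toStr k0 ++ PySem.Int.toStr k1, (xs.length : Int) - c0)
    | _ => none   -- len(runs) < 2

-- ===== PRECONDITION & SPEC =====
def Spec_detect_pattern_change (index_list : Option (List Int)) (out : Option (String × Int)) : Prop := out = detect_pattern_change_alt index_list
instance (index_list : Option (List Int)) (out : Option (String × Int)) : Decidable (Spec_detect_pattern_change index_list out) := by unfold Spec_detect_pattern_change; infer_instance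

-- ===== CLAIM (what is proved, stated in full; the proofs are below) =====
def Claim_equal_detect_pattern_change : Prop := ∀ (index_list : Option (List Int)), Dom_detect_pattern_change index_list → Spec_detect_pattern_change index_list (detect_pattern_change index_list)

-- ===== LEMMAS AND PROOFS =====

-- length of the leading run of elements equal to `h` (proof-side measure shared by both analyses)
def runLen (h : Int) : List Int → Nat
  | [] => 0
  | v :: rest => if v ≠ h then 0 else runLen h rest + 1

theorem runLen_le (h : Int) (t : List Int) : runLen h t ≤ t.length := by
  induction t with
  | nil => simp [runLen]
  | cons v rest ih =>
    by_cases hv : v ≠ h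
    · simp [runLen, hv]
    · simp [runLen, hv]; omega

-- A's scan with last_value = h, characterised by the leading-run length.
theorem detectLoopA_some (t : List Int) : ∀ (h : Int) (i : Int),
    detectLoopA t i (some h) =
      if runLen h t = t.length then none
      else some (PySem.Int.toStr h ++ PySem.Int.toStr (t.getD (runLen h t) 0),
                 (i - 1) + (runLen h t : Int)) := by
  induction t with
  | nil => intro h i; simp [detectLoopA, runLen]
  | cons x rest ih =>
    intro h i
    by_cases hx : x ≠ h
    · simp [detectLoopA, runLen, hx]
    · have hx' : x = h := by omega
      subst hx'
      have hxx : ¬ (x ≠ x) := by simp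
      rw [show detectLoopA (x :: rest) i (some x) = detectLoopA rest (i + 1) (some x) from by
        simp [detectLoopA]]
      rw [ih x (i + 1)]
      simp only [runLen, if_neg hxx, List.length_cons]
      by_cases hr : runLen x rest = rest.length
      · simp [hr]
      · have hne : ¬ (runLen x rest + 1 = rest.length + 1) := by omega
        simp only [if_neg hr, if_neg hne, List.getD_cons_succ, Option.some.injEq,
          Prod.mk.injEq, true_and]
        push_cast
        ring

-- stepB only ever inspects and rewrites the head of the stack, so entries below it ride along.
theorem foldl_stepB_slide (t : List Int) : ∀ (p : Int × Int) (ps : List (Int × Int)),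
    List.foldl stepB (p :: ps) t = List.foldl stepB [p] t ++ ps := by
  induction t with
  | nil => intro p ps; simp
  | cons v rest ih =>
    intro p ps
    obtain ⟨k, c⟩ := p
    by_cases hk : (k == v) = true
    · simp only [List.foldl_cons, stepB, if_pos hk]
      exact ih (k, c + 1) ps
    · simp only [List.foldl_cons, stepB, if_neg hk]
      rw [ih (v, 1) ((k, c) :: ps), ih (v, 1) [(k, c)], List.append_assoc]
      simp

-- the bottom entry's key is never changed by the loop
theorem foldl_stepB_bottom (t : List Int) : ∀ (k : Int) (c : Int),
    ∃ (pre : List (Int × Int)) (c' : Int),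
      List.foldl stepB [(k, c)] t = pre ++ [(k, c')] := by
  induction t with
  | nil => intro k c; exact ⟨[], c, rfl⟩
  | cons v rest ih =>
    intro k c
    by_cases hk : (k == v) = true
    · simp only [List.foldl_cons, stepB, if_pos hk]
      exact ih k (c + 1)
    · simp only [List.foldl_cons, stepB, if_neg hk]
      rw [foldl_stepB_slide rest (v, 1) [(k, c)]]
      obtain ⟨pre, c', hpre⟩ := ih v 1
      exact ⟨pre ++ [(v, c')], c, by rw [hpre]⟩

-- one maximal run: if the whole tail equals h, the stack stays a single entry
theorem foldl_stepB_full (t : List Int) : ∀ (h : Int) (c : Int), runLen h t = t.length →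
    List.foldl stepB [(h, c)] t = [(h, c + (runLen h t : Int))] := by
  induction t with
  | nil => intro h c _; simp [runLen]
  | cons v rest ih =>
    intro h c hr
    have hle := runLen_le h rest
    by_cases hv : v ≠ h
    · simp only [runLen, if_pos hv, List.length_cons] at hr; omega
    · have hv' : v = h := by omega
      subst hv'
      have hr' : runLen v rest = rest.length := by
        simp only [runLen, List.length_cons] at hr; simp at hr; omega
      simp only [List.foldl_cons, stepB, beq_self_eq_true, if_pos]
      rw [ih v (c + 1) hr']
      simp only [runLen]
      have : ¬ (v ≠ v) := by simp
      simp only [if_neg this]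
      push_cast; ring_nf

-- a change exists: the final stack is …, second-run entry keyed by the boundary element, first-run entry
theorem foldl_stepB_break (t : List Int) : ∀ (h : Int) (c : Int), runLen h t < t.length →
    ∃ (mid : List (Int × Int)) (c1 : Int),
      List.foldl stepB [(h, c)] t =
        mid ++ [(t.getD (runLen h t) 0, c1), (h, c + (runLen h t : Int))] := by
  induction t with
  | nil => intro h c hr; simp [runLen] at hr
  | cons v rest ih =>
    intro h c hr
    by_cases hv : v ≠ h
    · have hb : ¬ ((h == v) = true) := by simp; omega
      simp only [List.foldl_cons, stepB, if_neg hb]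
      rw [foldl_stepB_slide rest (v, 1) [(h, c)]]
      obtain ⟨pre, c', hpre⟩ := foldl_stepB_bottom rest v 1
      refine ⟨pre, c', ?_⟩
      rw [hpre]
      simp [runLen, hv, List.append_assoc]
    · have hv' : v = h := by omega
      subst hv'
      have hxx : ¬ (v ≠ v) := by simp
      have hr' : runLen v rest < rest.length := by
        simp only [runLen, if_neg hxx, List.length_cons] at hr; omega
      simp only [List.foldl_cons, stepB, beq_self_eq_true, if_pos]
      obtain ⟨mid, c1, hmid⟩ := ih v (c + 1) hr'
      refine ⟨mid, c1, ?_⟩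
      rw [hmid]
      simp only [runLen, if_neg hxx, List.getD_cons_succ]
      have : c + 1 + (runLen v rest : Int) = c + ((runLen v rest : Nat) + 1 : Nat) := by
        push_cast; ring
      rw [this]

theorem detect_pattern_change_spec : Claim_equal_detect_pattern_change := by
  unfold Claim_equal_detect_pattern_change
  intro index_list _
  unfold Spec_detect_pattern_change
  match index_list with
  | none => rfl
  | some [] => rfl
  | some (h :: t) =>
    have hA : detectLoopA (h :: t) 0 none = detectLoopA t 1 (some h) := by
      simp [detectLoopA]
    have hB : List.foldl stepB [] (h :: t) = List.foldl stepB [(h, 1)] t := by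
      simp [stepB]
    by_cases hr : runLen h t = t.length
    · -- no change: a single run
      simp only [detect_pattern_change, detect_pattern_change_alt]
      rw [hA, detectLoopA_some t h 1, if_pos hr]
      rw [hB, foldl_stepB_full t h 1 hr]
      rfl
    · have hlt : runLen h t < t.length := lt_of_le_of_ne (runLen_le h t) hr
      simp only [detect_pattern_change, detect_pattern_change_alt]
      rw [hA, detectLoopA_some t h 1, if_neg hr]
      rw [hB]
      obtain ⟨mid, c1, hmid⟩ := foldl_stepB_break t h 1 hlt
      rw [hmid]
      simp only [List.reverse_append, List.reverse_cons, List.reverse_nil,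
        List.nil_append, List.cons_append]
      simp only [Option.some.injEq, Prod.mk.injEq, true_and, List.length_cons]
      push_cast
      ring

-- ===== VERDICT (by name: the statement is the Claim_ definition above) =====
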